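-- pv_equiv track=rewrite | github.com/praj33/Law-Agent-by-Grok | expanded_legal_sections.py | _get_enhanced_query_sections
-- ===== SOURCE A (Python) =====
-- from typing import Dict, List, Tuple, Optional, Any
--
-- def _get_enhanced_query_sections(query_lower: str) -> Dict[str, List[str]]:
--     """Get enhanced query-specific sections based on detailed analysis"""
--
--     enhanced_sections = {"bns": [], "ipc": [], "crpc": []}
--
--     # Phone/mobile theft specific
--     if any(word in query_lower for word in ["phone", "mobile"]) and any(word in query_lower for word in ["stolen", "theft"]):
--         enhanced_sections["bns"].extend(["303", "304", "305", "315", "317"])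
--         enhanced_sections["ipc"].extend(["378", "379", "380", "392"])
--         enhanced_sections["crpc"].extend(["154", "156", "161", "41"])
--
--     # Hacking specific
--     if any(word in query_lower for word in ["hack", "hacked", "hacking"]):
--         enhanced_sections["bns"].extend(["346", "347", "348", "349", "319", "321"])
--         enhanced_sections["ipc"].extend(["420", "406", "415"])
--         enhanced_sections["crpc"].extend(["154", "156", "161"])
--
--     # Employment termination specific
--     if any(word in query_lower for word in ["fired", "terminated", "dismissed"]):
--         enhanced_sections["bns"].extend(["351", "352", "325", "326"])
--         enhanced_sections["ipc"].extend(["506", "406", "420"])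
--         enhanced_sections["crpc"].extend(["200", "202", "482"])
--
--     # Salary issues specific
--     if any(word in query_lower for word in ["salary", "wages", "pay"]):
--         enhanced_sections["bns"].extend(["325", "326", "351", "352"])
--         enhanced_sections["ipc"].extend(["406", "420", "506"])
--         enhanced_sections["crpc"].extend(["200", "202", "204"])
--
--     # Domestic violence specific
--     if any(word in query_lower for word in ["husband", "wife", "beats", "beating"]):
--         enhanced_sections["bns"].extend(["86", "87", "115", "116", "117", "118"])
--         enhanced_sections["ipc"].extend(["498A", "323", "324", "325"])
--         enhanced_sections["crpc"].extend(["154", "156", "200", "438"])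
--
--     # Landlord/tenant specific
--     if any(word in query_lower for word in ["landlord", "deposit", "rent"]):
--         enhanced_sections["bns"].extend(["323", "324", "325", "326", "351", "352"])
--         enhanced_sections["ipc"].extend(["406", "420", "506"])
--         enhanced_sections["crpc"].extend(["200", "202", "204"])
--
--     return enhanced_sections
-- ===== SOURCE B (Python) =====
-- from typing import Dict, List, Tuple, Optional, Any
--
-- # Each keyword is tagged with the legal topic it signals.
-- _KEYWORD_TAGS = [
--     ("phone", "device"), ("mobile", "device"),
--     ("stolen", "theft"), ("theft", "theft"),
--     ("hack", "hack"), ("hacked", "hack"), ("hacking", "hack"),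
--     ("fired", "job"), ("terminated", "job"), ("dismissed", "job"),
--     ("salary", "wage"), ("wages", "wage"), ("pay", "wage"),
--     ("husband", "dv"), ("wife", "dv"), ("beats", "dv"), ("beating", "dv"),
--     ("landlord", "rent"), ("deposit", "rent"), ("rent", "rent"),
-- ]
--
-- # A rule fires when every one of its required tags was detected.
-- _RULES = [
--     (("device", "theft"),
--      {"bns": ["303", "304", "305", "315", "317"], "ipc": ["378", "379", "380", "392"], "crpc": ["154", "156", "161", "41"]}),
--     (("hack",),
--      {"bns": ["346", "347", "348", "349", "319", "321"], "ipc": ["420", "406", "415"], "crpc": ["154", "156", "161"]}),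
--     (("job",),
--      {"bns": ["351", "352", "325", "326"], "ipc": ["506", "406", "420"], "crpc": ["200", "202", "482"]}),
--     (("wage",),
--      {"bns": ["325", "326", "351", "352"], "ipc": ["406", "420", "506"], "crpc": ["200", "202", "204"]}),
--     (("dv",),
--      {"bns": ["86", "87", "115", "116", "117", "118"], "ipc": ["498A", "323", "324", "325"], "crpc": ["154", "156", "200", "438"]}),
--     (("rent",),
--      {"bns": ["323", "324", "325", "326", "351", "352"], "ipc": ["406", "420", "506"], "crpc": ["200", "202", "204"]}),
-- ]
--
-- def _get_enhanced_query_sections(query_lower: str) -> Dict[str, List[str]]: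
--     """Get enhanced query-specific sections based on detailed analysis"""
--     # Stage 1: scan the keyword index once, collecting the set of detected tags.
--     tags = {tag for word, tag in _KEYWORD_TAGS if word in query_lower}
--     # Stage 2: a rule fires iff its required tags are all present.
--     fired = [sections for required, sections in _RULES if tags.issuperset(required)]
--     # Stage 3: assemble the answer key by key from the fired rules.
--     return {key: [s for sections in fired for s in sections[key]] for key in ("bns", "ipc", "crpc")}
-- ===== Notes on version B (the rewrite author's own statement) =====
-- stated objective: alternative
-- what changed: Replaces the flat per-rule if-blocks by a keyword-to-tag index scanned once into a set of detected tags, rules re-expressed as required-tag sets tested with issuperset, and the result dict assembled key by key from the fired rules instead of extended rule by rule.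
import Mathlib
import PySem

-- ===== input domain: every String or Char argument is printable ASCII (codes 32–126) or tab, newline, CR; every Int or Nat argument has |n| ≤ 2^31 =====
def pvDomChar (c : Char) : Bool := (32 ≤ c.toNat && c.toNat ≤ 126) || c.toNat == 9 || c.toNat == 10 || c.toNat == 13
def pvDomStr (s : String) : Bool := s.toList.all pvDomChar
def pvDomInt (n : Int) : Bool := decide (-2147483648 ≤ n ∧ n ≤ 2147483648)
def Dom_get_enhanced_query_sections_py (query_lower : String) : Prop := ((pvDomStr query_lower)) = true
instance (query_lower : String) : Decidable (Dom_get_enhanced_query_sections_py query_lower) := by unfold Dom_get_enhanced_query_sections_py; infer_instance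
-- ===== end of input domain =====

-- B replaces the flat if-blocks by a keyword→tag index scanned once into a tag set, rules stated
-- as required-tag sets, and the answer assembled key by key from the fired rules; same return value.

-- ===== PORT A =====
-- dict with fixed keys "bns","ipc","crpc"; .extend ported as Dict.modify appending
def get_enhanced_query_sections_py (query_lower : String) : List (String × List String) :=
  let d : PySem.Dict String (List String) :=
    PySem.Dict.ofList [("bns", ([] : List String)), ("ipc", []), ("crpc", [])]
  let d := if (List.any ["phone", "mobile"] fun w => PySem.Str.isIn w query_lower)
             && (List.any ["stolen", "theft"] fun w => PySem.Str.isIn w query_lower) then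
      ((d.modify "bns" [] (· ++ ["303", "304", "305", "315", "317"])).modify "ipc" []
        (· ++ ["378", "379", "380", "392"])).modify "crpc" [] (· ++ ["154", "156", "161", "41"])
    else d
  let d := if (List.any ["hack", "hacked", "hacking"] fun w => PySem.Str.isIn w query_lower) then
      ((d.modify "bns" [] (· ++ ["346", "347", "348", "349", "319", "321"])).modify "ipc" []
        (· ++ ["420", "406", "415"])).modify "crpc" [] (· ++ ["154", "156", "161"])
    else d
  let d := if (List.any ["fired", "terminated", "dismissed"] fun w => PySem.Str.isIn w query_lower) then
      ((d.modify "bns" [] (· ++ ["351", "352", "325", "326"])).modify "ipc" []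
        (· ++ ["506", "406", "420"])).modify "crpc" [] (· ++ ["200", "202", "482"])
    else d
  let d := if (List.any ["salary", "wages", "pay"] fun w => PySem.Str.isIn w query_lower) then
      ((d.modify "bns" [] (· ++ ["325", "326", "351", "352"])).modify "ipc" []
        (· ++ ["406", "420", "506"])).modify "crpc" [] (· ++ ["200", "202", "204"])
    else d
  let d := if (List.any ["husband", "wife", "beats", "beating"] fun w => PySem.Str.isIn w query_lower) then
      ((d.modify "bns" [] (· ++ ["86", "87", "115", "116", "117", "118"])).modify "ipc" []
        (· ++ ["498A", "323", "324", "325"])).modify "crpc" [] (· ++ ["154", "156", "200", "438"])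
    else d
  let d := if (List.any ["landlord", "deposit", "rent"] fun w => PySem.Str.isIn w query_lower) then
      ((d.modify "bns" [] (· ++ ["323", "324", "325", "326", "351", "352"])).modify "ipc" []
        (· ++ ["406", "420", "506"])).modify "crpc" [] (· ++ ["200", "202", "204"])
    else d
  d.items

-- ===== PORT B =====
-- the keyword → tag index
def pvKeywordTags : List (String × String) :=
  [("phone", "device"), ("mobile", "device"),
   ("stolen", "theft"), ("theft", "theft"),
   ("hack", "hack"), ("hacked", "hack"), ("hacking", "hack"),
   ("fired", "job"), ("terminated", "job"), ("dismissed", "job"),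
   ("salary", "wage"), ("wages", "wage"), ("pay", "wage"),
   ("husband", "dv"), ("wife", "dv"), ("beats", "dv"), ("beating", "dv"),
   ("landlord", "rent"), ("deposit", "rent"), ("rent", "rent")]

-- the rules: (required tags, (bns sections, ipc sections, crpc sections))
def pvRules : List (List String × List String × List String × List String) :=
  [(["device", "theft"],
    ["303", "304", "305", "315", "317"], ["378", "379", "380", "392"], ["154", "156", "161", "41"]),
   (["hack"],
    ["346", "347", "348", "349", "319", "321"], ["420", "406", "415"], ["154", "156", "161"]),
   (["job"],
    ["351", "352", "325", "326"], ["506", "406", "420"], ["200", "202", "482"]),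
   (["wage"],
    ["325", "326", "351", "352"], ["406", "420", "506"], ["200", "202", "204"]),
   (["dv"],
    ["86", "87", "115", "116", "117", "118"], ["498A", "323", "324", "325"], ["154", "156", "200", "438"]),
   (["rent"],
    ["323", "324", "325", "326", "351", "352"], ["406", "420", "506"], ["200", "202", "204"])]

-- stage 1: the set of detected tags (set comprehension over the keyword index)
def pvTags (query_lower : String) : PySem.Set String :=
  PySem.Set.ofList ((pvKeywordTags.filter (fun p => PySem.Str.isIn p.1 query_lower)).map (fun p => p.2))

def get_enhanced_query_sections_py_alt (query_lower : String) : List (String × List String) :=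
  let tags := pvTags query_lower
  -- stage 2: the rules whose required tags are all present
  let fired := pvRules.filter (fun r => PySem.Set.issuperset tags r.1)
  -- stage 3: assemble the answer key by key
  [("bns", fired.flatMap (fun r => r.2.1)),
   ("ipc", fired.flatMap (fun r => r.2.2.1)),
   ("crpc", fired.flatMap (fun r => r.2.2.2))]

-- ===== PRECONDITION & SPEC =====
def Spec_get_enhanced_query_sections_py (query_lower : String) (out : List (String × List String)) : Prop := out = get_enhanced_query_sections_py_alt query_lower
instance (query_lower : String) (out : List (String × List String)) : Decidable (Spec_get_enhanced_query_sections_py query_lower out) := by unfold Spec_get_enhanced_query_sections_py; infer_instance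

-- ===== CLAIM (what is proved, stated in full; the proofs are below) =====
def Claim_equal_get_enhanced_query_sections_py : Prop := ∀ (query_lower : String), Dom_get_enhanced_query_sections_py query_lower → Spec_get_enhanced_query_sections_py query_lower (get_enhanced_query_sections_py query_lower)

-- ===== LEMMAS AND PROOFS =====

def pvOut (c1 c2 c3 c4 c5 c6 : Bool) : List (String × List String) :=
  [("bns", (if c1 then ["303", "304", "305", "315", "317"] else []) ++
           (if c2 then ["346", "347", "348", "349", "319", "321"] else []) ++
           (if c3 then ["351", "352", "325", "326"] else []) ++
           (if c4 then ["325", "326", "351", "352"] else []) ++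
           (if c5 then ["86", "87", "115", "116", "117", "118"] else []) ++
           (if c6 then ["323", "324", "325", "326", "351", "352"] else [])),
   ("ipc", (if c1 then ["378", "379", "380", "392"] else []) ++
           (if c2 then ["420", "406", "415"] else []) ++
           (if c3 then ["506", "406", "420"] else []) ++
           (if c4 then ["406", "420", "506"] else []) ++
           (if c5 then ["498A", "323", "324", "325"] else []) ++
           (if c6 then ["406", "420", "506"] else [])),
   ("crpc", (if c1 then ["154", "156", "161", "41"] else []) ++
            (if c2 then ["154", "156", "161"] else []) ++
            (if c3 then ["200", "202", "482"] else []) ++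
            (if c4 then ["200", "202", "204"] else []) ++
            (if c5 then ["154", "156", "200", "438"] else []) ++
            (if c6 then ["200", "202", "204"] else []))]

theorem pv_sup_two (s : PySem.Set String) (a b : String) :
    PySem.Set.issuperset s [a, b] = (s.contains a && s.contains b) := by
  rw [Bool.eq_iff_iff]
  simp [PySem.Set.issuperset_iff, PySem.Set.contains_eq_listContains, List.contains_eq_mem]

theorem pv_sup_one (s : PySem.Set String) (a : String) :
    PySem.Set.issuperset s [a] = s.contains a := by
  rw [Bool.eq_iff_iff]
  simp [PySem.Set.issuperset_iff, PySem.Set.contains_eq_listContains, List.contains_eq_mem]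

theorem pv_contains_tags (q x : String) (l : List (String × String)) :
    (PySem.Set.ofList ((l.filter (fun p => PySem.Str.isIn p.1 q)).map (fun p => p.2))).contains x
      = l.any (fun p => PySem.Str.isIn p.1 q && p.2 == x) := by
  rw [Bool.eq_iff_iff]
  simp [PySem.Set.contains_eq_listContains, List.contains_eq_mem, PySem.Set.mem_ofList,
    List.mem_map, List.mem_filter, List.any_eq_true]

theorem pv_tag (q x : String) :
    (pvTags q).contains x = pvKeywordTags.any (fun p => PySem.Str.isIn p.1 q && p.2 == x) := by
  unfold pvTags; exact pv_contains_tags q x pvKeywordTags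

theorem pv_B_char (q : String) : get_enhanced_query_sections_py_alt q =
    pvOut ((PySem.Str.isIn "phone" q || PySem.Str.isIn "mobile" q) &&
           (PySem.Str.isIn "stolen" q || PySem.Str.isIn "theft" q))
      (PySem.Str.isIn "hack" q || (PySem.Str.isIn "hacked" q || PySem.Str.isIn "hacking" q))
      (PySem.Str.isIn "fired" q || (PySem.Str.isIn "terminated" q || PySem.Str.isIn "dismissed" q))
      (PySem.Str.isIn "salary" q || (PySem.Str.isIn "wages" q || PySem.Str.isIn "pay" q))
      (PySem.Str.isIn "husband" q || (PySem.Str.isIn "wife" q || (PySem.Str.isIn "beats" q || PySem.Str.isIn "beating" q)))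
      (PySem.Str.isIn "landlord" q || (PySem.Str.isIn "deposit" q || PySem.Str.isIn "rent" q)) := by
  unfold get_enhanced_query_sections_py_alt
  simp only [pvRules, List.filter_cons, List.filter_nil, pv_sup_two, pv_sup_one, pv_tag,
    pvKeywordTags, List.any_cons, List.any_nil]
  simp only [String.reduceBEq, beq_self_eq_true, Bool.and_true, Bool.and_false, Bool.or_false, Bool.false_or]
  generalize ((PySem.Str.isIn "phone" q || PySem.Str.isIn "mobile" q) && (PySem.Str.isIn "stolen" q || PySem.Str.isIn "theft" q)) = c1
  generalize (PySem.Str.isIn "hack" q || (PySem.Str.isIn "hacked" q || PySem.Str.isIn "hacking" q)) = c2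
  generalize (PySem.Str.isIn "fired" q || (PySem.Str.isIn "terminated" q || PySem.Str.isIn "dismissed" q)) = c3
  generalize (PySem.Str.isIn "salary" q || (PySem.Str.isIn "wages" q || PySem.Str.isIn "pay" q)) = c4
  generalize (PySem.Str.isIn "husband" q || (PySem.Str.isIn "wife" q || (PySem.Str.isIn "beats" q || PySem.Str.isIn "beating" q))) = c5
  generalize (PySem.Str.isIn "landlord" q || (PySem.Str.isIn "deposit" q || PySem.Str.isIn "rent" q)) = c6
  cases c1 <;> cases c2 <;> cases c3 <;> cases c4 <;> cases c5 <;> cases c6 <;> rfl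

theorem pv_A_char (q : String) : get_enhanced_query_sections_py q =
    pvOut ((PySem.Str.isIn "phone" q || PySem.Str.isIn "mobile" q) &&
           (PySem.Str.isIn "stolen" q || PySem.Str.isIn "theft" q))
      (PySem.Str.isIn "hack" q || (PySem.Str.isIn "hacked" q || PySem.Str.isIn "hacking" q))
      (PySem.Str.isIn "fired" q || (PySem.Str.isIn "terminated" q || PySem.Str.isIn "dismissed" q))
      (PySem.Str.isIn "salary" q || (PySem.Str.isIn "wages" q || PySem.Str.isIn "pay" q))
      (PySem.Str.isIn "husband" q || (PySem.Str.isIn "wife" q || (PySem.Str.isIn "beats" q || PySem.Str.isIn "beating" q)))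
      (PySem.Str.isIn "landlord" q || (PySem.Str.isIn "deposit" q || PySem.Str.isIn "rent" q)) := by
  unfold get_enhanced_query_sections_py
  simp only [List.any_cons, List.any_nil, Bool.or_false]
  generalize ((PySem.Str.isIn "phone" q || PySem.Str.isIn "mobile" q) && (PySem.Str.isIn "stolen" q || PySem.Str.isIn "theft" q)) = c1
  generalize (PySem.Str.isIn "hack" q || (PySem.Str.isIn "hacked" q || PySem.Str.isIn "hacking" q)) = c2
  generalize (PySem.Str.isIn "fired" q || (PySem.Str.isIn "terminated" q || PySem.Str.isIn "dismissed" q)) = c3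
  generalize (PySem.Str.isIn "salary" q || (PySem.Str.isIn "wages" q || PySem.Str.isIn "pay" q)) = c4
  generalize (PySem.Str.isIn "husband" q || (PySem.Str.isIn "wife" q || (PySem.Str.isIn "beats" q || PySem.Str.isIn "beating" q))) = c5
  generalize (PySem.Str.isIn "landlord" q || (PySem.Str.isIn "deposit" q || PySem.Str.isIn "rent" q)) = c6
  cases c1 <;> cases c2 <;> cases c3 <;> cases c4 <;> cases c5 <;> cases c6 <;> rfl

-- ===== VERDICT (by name: the statement is the Claim_ definition above) =====
theorem get_enhanced_query_sections_py_spec : Claim_equal_get_enhanced_query_sections_py := by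
  intro q _
  unfold Spec_get_enhanced_query_sections_py
  rw [pv_A_char, pv_B_char]
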